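-- pv_equiv track=rewrite | github.com/pst2154/ModelOptStreaming | modelopt_streaming/utils.py | is_text_only_key
-- ===== SOURCE A (Python) =====
-- def is_text_only_key(key: str) -> bool:
--     """
--     Determine if a tensor key belongs to the text-only model.
--
--     Args:
--         key: Tensor key from model weight map
--
--     Returns:
--         True if the tensor is part of the text-only model, False if it's vision-related
--     """
--     # Exclude vision-related keys
--     vision_patterns = [
--         "vision_model",
--         "vision_projection",
--         "vision_tower",
--         "mm_projector",
--         "visual",
--         "image_encoder",
--         "vision_embed_tokens",
--     ]
--
--     key_lower = key.lower()
--     return not any(pattern in key_lower for pattern in vision_patterns)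
-- ===== SOURCE B (Python) =====
-- VISION_PATTERNS = (
--     "vision_model",
--     "vision_projection",
--     "vision_tower",
--     "mm_projector",
--     "visual",
--     "image_encoder",
--     "vision_embed_tokens",
-- )
--
--
-- def is_text_only_key(key: str) -> bool:
--     k = key.lower()
--     for i in range(len(k)):
--         if k.startswith(VISION_PATTERNS, i):
--             return False
--     return True
-- ===== Notes on version B (the rewrite author's own statement) =====
-- stated objective: alternative
-- what changed: A runs seven independent substring-containment scans over the lowered key; B makes a single left-to-right pass over positions, testing at each position whether any pattern starts there (str.startswith with a tuple), with early exit on the first hit.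
import Mathlib
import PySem

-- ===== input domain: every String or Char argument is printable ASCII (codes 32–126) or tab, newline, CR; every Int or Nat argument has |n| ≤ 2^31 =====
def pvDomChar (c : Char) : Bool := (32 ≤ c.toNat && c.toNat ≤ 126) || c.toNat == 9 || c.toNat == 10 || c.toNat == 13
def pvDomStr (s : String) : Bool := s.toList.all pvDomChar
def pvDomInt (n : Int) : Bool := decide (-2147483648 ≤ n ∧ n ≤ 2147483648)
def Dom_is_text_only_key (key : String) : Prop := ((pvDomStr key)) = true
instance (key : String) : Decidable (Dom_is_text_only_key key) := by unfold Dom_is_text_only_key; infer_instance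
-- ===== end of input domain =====

-- B replaces A's seven independent substring-containment scans by a single left-to-right
-- position scan that tests all patterns at each position and exits on the first hit.

-- ===== PORT A =====
def is_text_only_key (key : String) : Bool :=
  let vision_patterns : List String :=
    ["vision_model", "vision_projection", "vision_tower", "mm_projector",
     "visual", "image_encoder", "vision_embed_tokens"]
  let key_lower := PySem.Str.lower key
  !(vision_patterns.any (fun pattern => PySem.Str.isIn pattern key_lower))

-- ===== PORT B =====
def pvVisionPatterns : List (List Char) :=
  ["vision_model", "vision_projection", "vision_tower", "mm_projector",
   "visual", "image_encoder", "vision_embed_tokens"].map String.toList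

-- the position loop of Source B: at each suffix, does any pattern start here?
def pvScan (pats : List (List Char)) : List Char → Bool
  | [] => true
  | c :: rest =>
    if pats.any (fun p => PySem.Chars.startswith (c :: rest) p) then false
    else pvScan pats rest

def is_text_only_key_alt (key : String) : Bool :=
  pvScan pvVisionPatterns (PySem.Chars.lower key.toList)

-- ===== PRECONDITION & SPEC =====
def Spec_is_text_only_key (key : String) (out : Bool) : Prop := out = is_text_only_key_alt key
instance (key : String) (out : Bool) : Decidable (Spec_is_text_only_key key out) := by unfold Spec_is_text_only_key; infer_instance

-- ===== CLAIM (what is proved, stated in full; the proofs are below) =====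
def Claim_equal_is_text_only_key : Prop := ∀ (key : String), Dom_is_text_only_key key → Spec_is_text_only_key key (is_text_only_key key)

-- ===== LEMMAS AND PROOFS =====

theorem pv_isIn_decide (p s : List Char) :
    PySem.Chars.isIn p s = decide (p <:+: s) := by
  by_cases hi : p <:+: s
  · simp [hi, (PySem.Chars.isIn_iff_infix _ _).mpr hi]
  · simp [hi, (PySem.Chars.isIn_eq_false_iff _ _).mpr hi]

theorem pvAnyCongr {α : Type} (l : List α) (p q : α → Bool)
    (h : ∀ a ∈ l, p a = q a) : l.any p = l.any q := by
  induction l with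
  | nil => rfl
  | cons a t ih =>
    simp only [List.any_cons, h a List.mem_cons_self,
      ih (fun b hb => h b (List.mem_cons_of_mem a hb))]

-- the position scan of B equals "no (nonempty) pattern occurs as an infix"
theorem pvScan_eq (pats : List (List Char)) (h : ∀ p ∈ pats, p ≠ []) :
    ∀ cs, pvScan pats cs = !(pats.any (fun p => PySem.Chars.isIn p cs)) := by
  intro cs
  induction cs with
  | nil =>
    simp only [pvScan]
    symm
    rw [Bool.not_eq_eq_eq_not, Bool.not_true, List.any_eq_false]
    intro p hp
    rw [pv_isIn_decide]
    simp [List.infix_nil, h p hp]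
  | cons c rest ih =>
    simp only [pvScan]
    by_cases hc : pats.any (fun p => PySem.Chars.startswith (c :: rest) p) = true
    · rw [if_pos hc]
      obtain ⟨p, hp, hsw⟩ := List.any_eq_true.mp hc
      have hpre : p <+: c :: rest := (PySem.Chars.startswith_iff _ _).mp hsw
      have : pats.any (fun p => PySem.Chars.isIn p (c :: rest)) = true :=
        List.any_eq_true.mpr ⟨p, hp, (PySem.Chars.isIn_iff_infix _ _).mpr hpre.isInfix⟩
      simp [this]
    · rw [if_neg hc, ih]
      have hco : (pats.any fun p => PySem.Chars.isIn p rest)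
          = pats.any fun p => PySem.Chars.isIn p (c :: rest) := by
        apply pvAnyCongr
        intro p hp
        have hnp : ¬ p <+: c :: rest := fun hpre =>
          hc (List.any_eq_true.mpr ⟨p, hp, (PySem.Chars.startswith_iff _ _).mpr hpre⟩)
        rw [pv_isIn_decide, pv_isIn_decide]
        have : (p <:+: rest) ↔ (p <:+: c :: rest) := by
          rw [List.infix_cons_iff]
          exact ⟨Or.inr, fun h => h.elim (fun h' => absurd h' hnp) id⟩
        simp [this]
      rw [hco]

-- ===== VERDICT (by name: the statement is the Claim_ definition above) =====
theorem is_text_only_key_spec : Claim_equal_is_text_only_key := by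
  intro key _
  unfold Spec_is_text_only_key is_text_only_key is_text_only_key_alt
  rw [pvScan_eq pvVisionPatterns (by decide)]
  simp [pvVisionPatterns, PySem.Str.toList_lower]
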